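-- pv_equiv track=rewrite | github.com/QuHarmonics/Nexus-4-Framework-Recursive-Harmonic-Architecture | Python Code - Raw Dump/Nexus 4 Framework -SHAunfolding-code_39- Qu Harmonics.py | pad_sha_style
-- ===== SOURCE A (Python) =====
-- def pad_sha_style(seed):
--     """
--     Apply SHA-like padding to the input seed.
--     """
--     # Convert seed to binary representation
--     seed_binary = "".join(f"{ord(c):08b}" for c in seed)
--
--     # Add a single '1' bit
--     padded_binary = seed_binary + "1"
--
--     # Add '0' bits until length is 448 mod 512
--     while len(padded_binary) % 512 != 448:
--         padded_binary += "0"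
--
--     # Append the original seed length as a 64-bit binary
--     seed_length = len(seed_binary)
--     padded_binary += f"{seed_length:064b}"
--
--     return [int(bit) for bit in padded_binary]  # Return as a list of bits
-- ===== SOURCE B (Python) =====
-- def pad_sha_style(seed):
--     """
--     Apply SHA-like padding to the input seed.
--
--     Closed-form version: builds the message bits directly with bit shifts
--     and computes the number of zero pad bits with modular arithmetic
--     instead of growing a string one bit at a time.
--     """
--     bits = [(ord(c) >> k) & 1 for c in seed for k in (7, 6, 5, 4, 3, 2, 1, 0)]
--     L = len(bits)
--     zeros = (448 - (L + 1)) % 512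
--     return bits + [1] + [0] * zeros + [int(b) for b in format(L, "064b")]
-- ===== Notes on version B (the rewrite author's own statement) =====
-- stated objective: simpler
-- what changed: Replaces the per-character string formatting and the one-bit-at-a-time while loop with a direct bit-shift comprehension and a closed-form modular count of the zero pad bits, building the bit list in one shot.
import Mathlib
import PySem

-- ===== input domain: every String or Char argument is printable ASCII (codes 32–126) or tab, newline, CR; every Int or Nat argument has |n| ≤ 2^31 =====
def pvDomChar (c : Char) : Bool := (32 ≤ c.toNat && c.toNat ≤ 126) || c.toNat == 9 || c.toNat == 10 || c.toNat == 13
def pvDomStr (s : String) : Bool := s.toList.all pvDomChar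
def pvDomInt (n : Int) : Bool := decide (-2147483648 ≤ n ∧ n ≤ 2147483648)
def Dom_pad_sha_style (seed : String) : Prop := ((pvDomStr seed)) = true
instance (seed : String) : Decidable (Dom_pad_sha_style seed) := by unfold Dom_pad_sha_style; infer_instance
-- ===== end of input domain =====

-- B replaces A's per-char string formatting and one-bit-at-a-time zero-padding loop
-- with a bit-shift comprehension and a closed-form modular zero count (objective: simpler).

-- ===== PORT A =====

-- f"{n:0<w>b}": binary digits of n (via Nat.toDigits 2, exact for n ≥ 0), left-padded with '0' to minimum width w
def fmtBin (w n : Nat) : List Char :=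
  let ds := Nat.toDigits 2 n
  List.replicate (w - ds.length) '0' ++ ds

-- int(bit) for bit ∈ {'0','1'} (the only characters the padded string contains)
def bitVal (c : Char) : Int := if c = '1' then 1 else 0

-- the while loop: append '0' until length % 512 == 448; the fuel argument only
-- makes the recursion structural — at most 511 iterations are ever needed, so
-- fuel 512 never runs out (proved in padLoop_eq below)
def padLoop : Nat → List Char → List Char
  | 0, s => s
  | fuel + 1, s => if s.length % 512 = 448 then s else padLoop fuel (s ++ ['0'])

def pad_sha_style (seed : String) : List Int :=
  let seedBinary := seed.toList.flatMap (fun c => fmtBin 8 c.toNat)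
  let padded := padLoop 512 (seedBinary ++ ['1'])
  let full := padded ++ fmtBin 64 seedBinary.length
  full.map bitVal

-- ===== PORT B =====

-- the 8 bits of one character: [(ord(c) >> k) & 1 for k in (7,…,0)]
def byteBits (n : Nat) : List Int :=
  ([7, 6, 5, 4, 3, 2, 1, 0] : List Nat).map (fun k => Int.land ((n : Int) >>> k) 1)

def pad_sha_style_alt (seed : String) : List Int :=
  let bits := seed.toList.flatMap (fun c => byteBits c.toNat)
  let L := bits.length
  let zeros := PySem.Int.mod (448 - ((L : Int) + 1)) 512
  bits ++ [1] ++ List.replicate zeros.toNat 0 ++ (fmtBin 64 L).map bitVal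

-- ===== PRECONDITION & SPEC =====
def Spec_pad_sha_style (seed : String) (out : List Int) : Prop := out = pad_sha_style_alt seed
instance (seed : String) (out : List Int) : Decidable (Spec_pad_sha_style seed out) := by unfold Spec_pad_sha_style; infer_instance

-- ===== CLAIM (what is proved, stated in full; the proofs are below) =====
def Claim_equal_pad_sha_style : Prop := ∀ (seed : String), Dom_pad_sha_style seed → Spec_pad_sha_style seed (pad_sha_style seed)

-- ===== LEMMAS AND PROOFS =====

theorem chunk_eq : ∀ n < 127, (fmtBin 8 n).map bitVal = byteBits n := by
  decide

theorem dom_char_lt (c : Char) (h : pvDomChar c = true) : c.toNat < 127 := by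
  simp [pvDomChar] at h
  omega

theorem padLoop_eq (fuel : Nat) (s : List Char)
    (hf : (960 - s.length % 512) % 512 ≤ fuel) :
    padLoop fuel s = s ++ List.replicate ((960 - s.length % 512) % 512) '0' := by
  induction fuel generalizing s with
  | zero =>
    have h0 : (960 - s.length % 512) % 512 = 0 := by omega
    have h448 : s.length % 512 = 448 := by omega
    simp [padLoop, h0]
  | succ fuel ih =>
    by_cases h : s.length % 512 = 448
    · simp [padLoop, h]
    · have hstep : (960 - (s ++ ['0']).length % 512) % 512 + 1
          = (960 - s.length % 512) % 512 := by
        simp [List.length_append]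
        omega
      rw [padLoop, if_neg h, ih (s ++ ['0']) (by omega), List.append_assoc]
      congr 1
      rw [← hstep]
      simp [List.replicate_succ]

theorem flatMap_chunks (l : List Char) (hd : ∀ c ∈ l, pvDomChar c = true) :
    (l.flatMap (fun c => fmtBin 8 c.toNat)).map bitVal
      = l.flatMap (fun c => byteBits c.toNat) := by
  induction l with
  | nil => simp
  | cons c l ih =>
    simp only [List.flatMap_cons, List.map_append]
    rw [chunk_eq c.toNat (dom_char_lt c (hd c (by simp))),
        ih (fun x hx => hd x (by simp [hx]))]

-- ===== VERDICT (by name: the statement is the Claim_ definition above) =====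
theorem pad_sha_style_spec : Claim_equal_pad_sha_style := by
  intro seed hdom
  unfold Spec_pad_sha_style
  simp only [pad_sha_style, pad_sha_style_alt]
  have hd : ∀ c ∈ seed.toList, pvDomChar c = true := by
    unfold Dom_pad_sha_style pvDomStr at hdom
    simpa [List.all_eq_true] using hdom
  set l := seed.toList
  have hchunks := flatMap_chunks l hd
  have hlen : (l.flatMap (fun c => fmtBin 8 c.toNat)).length
      = (l.flatMap (fun c => byteBits c.toNat)).length := by
    rw [← hchunks, List.length_map]
  rw [padLoop_eq 512 _ (by simp [List.length_append]; omega)]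
  simp only [List.map_append, List.map_replicate]
  rw [hchunks, hlen]
  set L := (l.flatMap (fun c => byteBits c.toNat)).length with hL
  simp [List.length_append, bitVal]
  have hsum : ((l.map (fun a => (fmtBin 8 a.toNat).length)).sum) = L := by
    rw [← List.length_flatMap]
    exact hlen
  rw [hsum]
  omega
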